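-- pv_equiv track=rewrite | github.com/brunoooost/mifare1k-flipmaker | url2nfc-fliper.py | dividir_en_filas
-- ===== SOURCE A (Python) =====
-- def dividir_en_filas(resultado, longitud_fila=32):
--     resultado = resultado.replace(" ", "")
--     bytes_separados = [resultado[i:i+2] for i in range(0, len(resultado), 2)]
--     filas = [
--         ' '.join(bytes_separados[i:i+(longitud_fila // 2)])
--         for i in range(0, len(bytes_separados), longitud_fila // 2)
--     ]
--     return filas
-- ===== SOURCE B (Python) =====
-- def dividir_en_filas(resultado, longitud_fila=32):
--     pares_por_fila = longitud_fila // 2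
--     filas = []
--     fila = []
--     en_par = False
--     pares = 0
--     for c in resultado.replace(" ", ""):
--         if en_par:
--             fila.append(c)
--             en_par = False
--         else:
--             if pares == pares_por_fila:
--                 filas.append(''.join(fila))
--                 fila = []
--                 pares = 0
--             if pares:
--                 fila.append(' ')
--             fila.append(c)
--             en_par = True
--             pares += 1
--     if fila:
--         filas.append(''.join(fila))
--     return filas
-- ===== Notes on version B (the rewrite author's own statement) =====
-- stated objective: alternative
-- what changed: B is a single-pass streaming state machine: it folds over the cleaned characters once, maintaining the current row buffer, a byte-parity flag and a pair counter, flushing a finished row when the next row's first character arrives, instead of A's staged slicing (build the full byte-pair list, then regroup it into row slices).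
-- outside the precondition, e.g. on dividir_en_filas('AABB', -2): A returns [], B returns ['AA BB']
import Mathlib
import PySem

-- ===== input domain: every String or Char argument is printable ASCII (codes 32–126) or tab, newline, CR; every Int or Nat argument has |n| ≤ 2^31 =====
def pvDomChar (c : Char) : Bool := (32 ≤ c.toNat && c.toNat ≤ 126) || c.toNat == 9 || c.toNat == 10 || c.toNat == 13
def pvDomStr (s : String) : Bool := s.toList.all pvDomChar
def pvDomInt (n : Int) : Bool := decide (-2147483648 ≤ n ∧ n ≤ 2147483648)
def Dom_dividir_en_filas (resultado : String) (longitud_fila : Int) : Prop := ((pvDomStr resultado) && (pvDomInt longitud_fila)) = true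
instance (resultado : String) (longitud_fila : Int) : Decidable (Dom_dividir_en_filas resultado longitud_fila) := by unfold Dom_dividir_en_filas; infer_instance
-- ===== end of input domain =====

-- B replaces A's staged slicing (byte-pair list regrouped into row slices) by a single-pass
-- streaming state machine over the cleaned characters (row buffer + parity flag + pair counter).


-- ===== PORT A =====
def dividir_en_filas (resultado : String) (longitud_fila : Int) : List String :=
  let resultado := PySem.Str.replace resultado " " ""
  let bytes_separados : List String :=
    (PySem.List.pyRange 0 (PySem.Str.len resultado) 2).map
      (fun i => PySem.Str.slice resultado (some i) (some (i + 2)))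
  (PySem.List.pyRange 0 (bytes_separados.length : Int) (PySem.Int.floordiv longitud_fila 2)).map
    (fun i => PySem.Str.join " "
      (PySem.List.slice bytes_separados (some i) (some (i + PySem.Int.floordiv longitud_fila 2))))

-- ===== PORT B =====
-- the loop body of B's for-loop: state (filas, fila, en_par, pares)
def pasoB (ppf : Int) (st : List String × List Char × Bool × Int) (c : Char) :
    List String × List Char × Bool × Int :=
  match st with
  | (filas, fila, en_par, pares) =>
    if en_par then (filas, fila ++ [c], false, pares)
    else
      match (if pares = ppf then (filas ++ [String.ofList fila], ([] : List Char), (0 : Int))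
             else (filas, fila, pares)) with
      | (filas, fila, pares) =>
        (filas, (if pares ≠ 0 then fila ++ [' '] else fila) ++ [c], true, pares + 1)

-- ''.join of a list of single characters = String.ofList (exact)
def dividir_en_filas_alt (resultado : String) (longitud_fila : Int) : List String :=
  let pares_por_fila := PySem.Int.floordiv longitud_fila 2
  match (PySem.Str.replace resultado " " "").toList.foldl (pasoB pares_por_fila)
      ([], [], false, 0) with
  | (filas, fila, _, _) => if fila ≠ [] then filas ++ [String.ofList fila] else filas

-- ===== PRECONDITION & SPEC =====
-- Pre_ excludes longitud_fila < 2: for 0 and 1 both of A's range calls raise ValueError (step 0),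
-- and for negative widths — a degenerate width no caller would specify — A's negative range step
-- yields [] while the streaming B emits the bytes as one row; neither choice is canonical.
def Pre_dividir_en_filas (_resultado : String) (longitud_fila : Int) : Prop :=
  2 ≤ longitud_fila
instance (resultado : String) (longitud_fila : Int) : Decidable (Pre_dividir_en_filas resultado longitud_fila) := by unfold Pre_dividir_en_filas; infer_instance
def pvWitness_dividir_en_filas : String × Int := ("AA BBCCDD", 4)

def Spec_dividir_en_filas (resultado : String) (longitud_fila : Int) (out : List String) : Prop := out = dividir_en_filas_alt resultado longitud_fila
instance (resultado : String) (longitud_fila : Int) (out : List String) : Decidable (Spec_dividir_en_filas resultado longitud_fila out) := by unfold Spec_dividir_en_filas; infer_instance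

-- ===== CLAIM (what is proved, stated in full; the proofs are below) =====
def Claim_equal_dividir_en_filas : Prop := ∀ (resultado : String) (longitud_fila : Int), Dom_dividir_en_filas resultado longitud_fila → Pre_dividir_en_filas resultado longitud_fila → Spec_dividir_en_filas resultado longitud_fila (dividir_en_filas resultado longitud_fila)

-- ===== LEMMAS AND PROOFS =====

-- chunks of size w+1 (w+1 > 0, so this is total without a positivity hypothesis)
def chunk {α : Type} (w : Nat) : List α → List (List α)
  | [] => []
  | x :: xs => (x :: xs.take w) :: chunk w (xs.drop w)
termination_by l => l.length
decreasing_by simp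

lemma range_drop_take_chunk {α : Type} (w : Nat) (xs : List α) :
    (List.range ((xs.length + w) / (w + 1))).map
      (fun k => (xs.drop ((w + 1) * k)).take (w + 1)) = chunk w xs := by
  induction xs using chunk.induct w with
  | case1 =>
    rw [List.length_nil, Nat.zero_add, Nat.div_eq_of_lt (Nat.lt_succ_self w)]
    simp [chunk]
  | case2 x xs ih =>
    rw [chunk]
    have hc : (x :: xs).length + w = xs.length + (w + 1) := by simp; omega
    rw [hc, Nat.add_div_right _ (Nat.succ_pos w), List.range_succ_eq_map, List.map_cons,
        List.map_map]
    have hlen : ((List.drop w xs).length + w) / (w + 1) = xs.length / (w + 1) := by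
      rcases Nat.lt_or_ge xs.length w with h | h
      · rw [List.length_drop, Nat.sub_eq_zero_of_le (Nat.le_of_lt h), Nat.zero_add,
            Nat.div_eq_of_lt (Nat.lt_succ_self w), Nat.div_eq_of_lt (by omega)]
      · congr 1; simp; omega
    refine congrArg₂ List.cons (by simp) ?_
    rw [← ih, hlen]
    refine List.map_congr_left (fun k _ => ?_)
    simp only [Function.comp_apply, List.drop_drop, Nat.mul_succ]
    rw [show (w + 1) * k + (w + 1) = ((w + 1) * k + w) + 1 by omega, List.drop_succ_cons,
        show w + (w + 1) * k = (w + 1) * k + w by omega]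

lemma pyRange_slice_chunk {α : Type} (w : Nat) (xs : List α) :
    (PySem.List.pyRange 0 (xs.length : Int) ((w : Int) + 1)).map
      (fun i => PySem.List.slice xs (some i) (some (i + ((w : Int) + 1)))) = chunk w xs := by
  rw [PySem.List.pyRange_of_pos 0 (xs.length : Int) (by omega : (0:Int) < (w:Int)+1),
      List.map_map, ← range_drop_take_chunk w xs]
  have hcnt : (if (0:Int) < (xs.length : Int) then
      (((xs.length : Int) - 0 + ((w : Int) + 1) - 1) / ((w : Int) + 1)).toNat else 0)
      = (xs.length + w) / (w + 1) := by
    rcases Nat.eq_zero_or_pos xs.length with h | h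
    · simp [h, Nat.div_eq_of_lt (Nat.lt_succ_self w)]
    · rw [if_pos (by exact_mod_cast h),
          show ((xs.length : Int) - 0 + ((w : Int) + 1) - 1) = ((xs.length + w : Nat) : Int) by
            push_cast; ring,
          show ((w : Int) + 1) = ((w + 1 : Nat) : Int) by push_cast; ring,
          ← Int.natCast_ediv, Int.toNat_natCast]
  rw [hcnt]
  refine List.map_congr_left (fun k _ => ?_)
  simp only [Function.comp_apply, zero_add]
  rw [show ((w : Int) + 1) * (k : Int) = (((w + 1) * k : Nat) : Int) by push_cast; ring,
      show ((((w + 1) * k : Nat)) : Int) + ((w : Int) + 1) = (((w + 1) * k + (w + 1) : Nat) : Int) by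
        push_cast; ring,
      PySem.List.slice_natCast]
  congr 1
  omega

lemma map_pyRange_slice {α : Type} {β : Type} (w : Nat) (xs : List α) (g : List α → β) :
    (PySem.List.pyRange 0 (xs.length : Int) ((w : Int) + 1)).map
      (fun i => g (PySem.List.slice xs (some i) (some (i + ((w : Int) + 1)))))
      = (chunk w xs).map g := by
  have h := congrArg (List.map g) (pyRange_slice_chunk w xs)
  rw [List.map_map] at h
  simpa [Function.comp] using h

lemma map_pyRange_slice_two {α : Type} {β : Type} (xs : List α) (g : List α → β) :
    (PySem.List.pyRange 0 (xs.length : Int) 2).map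
      (fun i => g (PySem.List.slice xs (some i) (some (i + 2))))
      = (chunk 1 xs).map g := by
  have h := map_pyRange_slice 1 xs g
  norm_num at h
  exact h

lemma portA_eq (resultado : String) (l : Int) (j : Nat)
    (hl : PySem.Int.floordiv l 2 = (j : Int) + 1) :
    dividir_en_filas resultado l =
      (chunk j ((chunk 1 (PySem.Str.replace resultado " " "").toList).map String.ofList)).map
        (PySem.Str.join " ") := by
  simp only [dividir_en_filas, hl, PySem.Str.slice, PySem.Chars.slice_eq_listSlice,
    PySem.Str.len_eq]
  rw [map_pyRange_slice_two _ String.ofList, map_pyRange_slice j _ (PySem.Str.join " ")]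

-- chunk-regrouping lemmas (shared shape of both sides)
lemma chunk_one_take (j : Nat) (u : List Char) :
    (chunk 1 u).take j = chunk 1 (u.take (2 * j)) := by
  induction j generalizing u with
  | zero => simp [chunk]
  | succ j ih =>
    cases u with
    | nil => simp [chunk]
    | cons c t =>
      rw [chunk, List.take_succ_cons, ih,
          show 2 * (j + 1) = (2 * j + 1) + 1 by omega, List.take_succ_cons, chunk,
          List.take_take, List.drop_take]
      simp

lemma chunk_one_drop (j : Nat) (u : List Char) :
    (chunk 1 u).drop j = chunk 1 (u.drop (2 * j)) := by
  induction j generalizing u with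
  | zero => simp
  | succ j ih =>
    cases u with
    | nil => simp [chunk]
    | cons c t =>
      rw [chunk, List.drop_succ_cons, ih,
          show 2 * (j + 1) = 1 + (2 * j + 1) by omega, ← List.drop_drop, List.drop_succ_cons,
          List.drop_drop, Nat.add_comm (2 * j) 1]
      simp

lemma chunk_map {α β : Type} (w : Nat) (f : α → β) (xs : List α) :
    chunk w (xs.map f) = (chunk w xs).map (List.map f) := by
  induction xs using chunk.induct w with
  | case1 => simp [chunk]
  | case2 x xs ih =>
    rw [List.map_cons, chunk, chunk, List.map_cons, ← List.map_take, ← List.map_drop, ih, List.map_cons]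

lemma chunk_chunk_one (j : Nat) (s : List Char) :
    chunk j (chunk 1 s) = (chunk (2 * j + 1) s).map (chunk 1) := by
  induction s using chunk.induct (2 * j + 1) with
  | case1 => simp [chunk]
  | case2 c t ih =>
    have h1 : chunk 1 (c :: t) = (c :: t.take 1) :: chunk 1 (t.drop 1) := by rw [chunk]
    have h2 : chunk (2 * j + 1) (c :: t)
        = (c :: t.take (2 * j + 1)) :: chunk (2 * j + 1) (t.drop (2 * j + 1)) := by rw [chunk]
    have h3 : chunk 1 (c :: t.take (2 * j + 1))
        = (c :: (t.take (2 * j + 1)).take 1) :: chunk 1 ((t.take (2 * j + 1)).drop 1) := by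
      rw [chunk]
    rw [h1, chunk, chunk_one_take, chunk_one_drop, List.drop_drop,
        show 1 + 2 * j = 2 * j + 1 by omega, ih, h2, List.map_cons, h3,
        List.take_take, List.drop_take]
    simp

-- the spaced tail of a row: ' ' before every byte pair after the first
def sp (u : List Char) : List Char := ((chunk 1 u).map (fun p => ' ' :: p)).flatten

-- one full B row as characters
lemma join_cons_flatten (x : List Char) (xs : List (List Char)) :
    PySem.Chars.join [' '] (x :: xs) = x ++ (xs.map (fun y => ' ' :: y)).flatten := by
  induction xs generalizing x with
  | nil => simp [PySem.Chars.join_singleton]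
  | cons y ys ih => rw [PySem.Chars.join_cons_cons, ih y]; simp

lemma rowJoin (u : List Char) :
    PySem.Str.join " " ((chunk 1 u).map String.ofList)
      = String.ofList (u.take 2 ++ sp (u.drop 2)) := by
  rw [← String.ofList_toList (s := PySem.Str.join " " ((chunk 1 u).map String.ofList))]
  congr 1
  rw [PySem.Str.toList_join, List.map_map]
  have hmap : (String.toList ∘ String.ofList) = (id : List Char → List Char) := by
    funext v; simp
  rw [hmap, List.map_id]
  cases u with
  | nil => simp [chunk, sp, PySem.Chars.join_nil]
  | cons a rest =>
    rw [chunk, show (" ").toList = [' '] from rfl, join_cons_flatten]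
    simp [sp]

-- the fold inside a row: from a state with 1 ≤ pares and room left, no flush happens
lemma fillB (j : Nat) (u : List Char) : ∀ (filas : List String) (fila : List Char) (p : Int),
    1 ≤ p → p + ((u.length + 1) / 2 : Nat) ≤ (j : Int) + 1 →
    u.foldl (pasoB ((j : Int) + 1)) (filas, fila, false, p)
      = (filas, fila ++ sp u, decide (u.length % 2 = 1), p + ((u.length + 1) / 2 : Nat)) := by
  induction u using chunk.induct 1 with
  | case1 => intro filas fila p h1 h2; simp [sp, chunk]
  | case2 a rest ih =>
    intro filas fila p h1 h2
    have hne : p ≠ (j : Int) + 1 := by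
      have : 1 ≤ (((a :: rest).length + 1) / 2 : Nat) := by simp; omega
      push_cast at h2; omega
    have hp0 : p ≠ 0 := by omega
    have hstep : pasoB ((j : Int) + 1) (filas, fila, false, p) a
        = (filas, (fila ++ [' ']) ++ [a], true, p + 1) := by
      simp [pasoB, hne, hp0]
    cases rest with
    | nil =>
      rw [List.foldl_cons, hstep, List.foldl_nil]
      simp [sp, chunk]
    | cons b rest2 =>
      have hstep2 : pasoB ((j : Int) + 1) (filas, (fila ++ [' ']) ++ [a], true, p + 1) b
          = (filas, ((fila ++ [' ']) ++ [a]) ++ [b], false, p + 1) := by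
        simp [pasoB]
      have ih' := ih
      simp only [List.drop_one, List.tail_cons] at ih'
      rw [List.foldl_cons, hstep, List.foldl_cons, hstep2,
          ih' filas (((fila ++ [' ']) ++ [a]) ++ [b]) (p + 1) (by omega)
            (by simp at h2 ⊢; omega)]
      refine congrArg₂ Prod.mk rfl (congrArg₂ Prod.mk ?_ (congrArg₂ Prod.mk ?_ ?_))
      · simp [sp, chunk]
      · simp only [List.length_cons, decide_eq_decide]; omega
      · push_cast; simp; omega

-- finishing step of B (the trailing 'if fila:')
def terminaB (st : List String × List Char × Bool × Int) : List String :=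
  if st.2.1 ≠ [] then st.1 ++ [String.ofList st.2.1] else st.1

lemma coreB (j : Nat) (s : List Char) : ∀ (filas : List String),
    terminaB (s.foldl (pasoB ((j : Int) + 1)) (filas, [], false, 0))
      = filas ++ (chunk (2 * j + 1) s).map
          (fun u => String.ofList (u.take 2 ++ sp (u.drop 2))) := by
  induction s using chunk.induct (2 * j + 1) with
  | case1 => intro filas; simp [terminaB, chunk]
  | case2 c t ih =>
    intro filas
    have h0 : (0 : Int) ≠ (j : Int) + 1 := by omega
    have hstep : pasoB ((j : Int) + 1) (filas, [], false, 0) c = (filas, [c], true, 1) := by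
      simp [pasoB, h0]
    rw [List.foldl_cons, hstep]
    cases t with
    | nil => simp [terminaB, chunk, sp]
    | cons d t2 =>
      have hstep2 : pasoB ((j : Int) + 1) (filas, [c], true, 1) d
          = (filas, [c, d], false, 1) := by
        simp [pasoB]
      rw [List.foldl_cons, hstep2]
      have hsplit := (List.take_append_drop (2 * j) t2).symm
      have hfill := fillB j (t2.take (2 * j)) filas [c, d] 1 (by omega)
        (by
          have hl : (t2.take (2 * j)).length ≤ 2 * j := by
            exact List.length_take_le _ _
          push_cast; omega)
      conv_lhs => rw [hsplit, List.foldl_append, hfill]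
      cases hd : t2.drop (2 * j) with
      | nil =>
        have htk : t2.take (2 * j) = t2 := by
          have := List.drop_eq_nil_iff.mp hd
          exact List.take_of_length_le this
        rw [List.foldl_nil, htk]
        rw [chunk, List.drop_succ_cons, hd, chunk]
        simp [terminaB, htk]
        rw [← String.ofList_append]
        rfl
      | cons e t3 =>
        have hlen : (t2.take (2 * j)).length = 2 * j := by
          have : ¬ t2.length ≤ 2 * j := fun h => by
            rw [List.drop_eq_nil_iff.mpr h] at hd; exact (List.cons_ne_nil e t3) hd.symm
          rw [List.length_take]; omega
        have hfull : (1 : Int) + (((t2.take (2 * j)).length + 1) / 2 : Nat) = (j : Int) + 1 := by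
          rw [hlen]; push_cast; omega
        have hpar : decide ((t2.take (2 * j)).length % 2 = 1) = false := by
          rw [hlen]; simp [Nat.mul_mod_right]
        rw [hfull, hpar]
        have hfirst : pasoB ((j : Int) + 1)
              (filas, [c, d] ++ sp (t2.take (2 * j)), false, (j : Int) + 1) e
            = pasoB ((j : Int) + 1)
              (filas ++ [String.ofList ([c, d] ++ sp (t2.take (2 * j)))], [], false, 0) e := by
          simp [pasoB, h0]
        rw [List.foldl_cons, hfirst, ← List.foldl_cons]
        have ih' := ih (filas ++ [String.ofList ([c, d] ++ sp (t2.take (2 * j)))])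
        rw [List.drop_succ_cons, hd] at ih'
        rw [ih']
        conv_rhs => rw [chunk]
        rw [List.drop_succ_cons, hd,
            show (d :: t2).take (2 * j + 1) = d :: t2.take (2 * j) from rfl]
        simp [List.append_assoc]
        rw [← String.ofList_append]
        rfl

lemma portB_eq (resultado : String) (l : Int) (j : Nat)
    (hl : PySem.Int.floordiv l 2 = (j : Int) + 1) :
    dividir_en_filas_alt resultado l =
      (chunk (2 * j + 1) (PySem.Str.replace resultado " " "").toList).map
        (fun u => String.ofList (u.take 2 ++ sp (u.drop 2))) := by
  have h := coreB j (PySem.Str.replace resultado " " "").toList []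
  simp only [dividir_en_filas_alt, hl]
  rw [show ([] : List String) ++ _ = _ from List.nil_append _] at h
  rw [← h]
  unfold terminaB
  rfl

-- ===== VERDICT (by name: the statement is the Claim_ definition above) =====
theorem dividir_en_filas_spec : Claim_equal_dividir_en_filas := by
  intro resultado l _ hPre
  have h2 : 2 ≤ l := hPre
  unfold Spec_dividir_en_filas
  obtain ⟨j, hj⟩ : ∃ j : Nat, PySem.Int.floordiv l 2 = (j : Int) + 1 := by
    rw [PySem.Int.floordiv_eq_ediv_of_pos (by omega)]
    refine ⟨(l / 2 - 1).toNat, ?_⟩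
    have : 1 ≤ l / 2 := by omega
    omega
  rw [portA_eq resultado l j hj, portB_eq resultado l j hj, chunk_map, chunk_chunk_one,
      List.map_map, List.map_map]
  refine List.map_congr_left (fun u _ => ?_)
  simpa [Function.comp] using rowJoin u
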